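-- pv_equiv track=rewrite | github.com/zhangchuheng123/RLinf | rlinf_noray/utils/comm_mapping.py | get_dst_ranks
-- ===== SOURCE A (Python) =====
-- def get_dst_ranks(
--     batch_size: int, src_world_size: int, dst_world_size: int, src_rank: int
-- ) -> list[tuple[int, int]]:
--     """Compute destination ranks and transfer sizes for one source rank."""
--     assert batch_size % src_world_size == 0, (
--         f"batch_size ({batch_size}) must be divisible by src_world_size ({src_world_size})."
--     )
--     assert batch_size % dst_world_size == 0, (
--         f"batch_size ({batch_size}) must be divisible by dst_world_size ({dst_world_size})."
--     )
--     assert 0 <= src_rank < src_world_size, (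
--         f"src_rank ({src_rank}) must be in [0, {src_world_size})."
--     )
--
--     batch_size_per_src_rank = batch_size // src_world_size
--     batch_size_per_dst_rank = batch_size // dst_world_size
--
--     dst_ranks_and_sizes: list[tuple[int, int]] = []
--     batch_begin = src_rank * batch_size_per_src_rank
--     batch_end = (src_rank + 1) * batch_size_per_src_rank
--     while batch_begin < batch_end:
--         dst_rank = batch_begin // batch_size_per_dst_rank
--         dst_batch_begin = dst_rank * batch_size_per_dst_rank
--         dst_remaining = batch_size_per_dst_rank - (batch_begin - dst_batch_begin)
--         src_remaining = batch_end - batch_begin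
--         dst_size = min(dst_remaining, src_remaining)
--         dst_ranks_and_sizes.append((dst_rank, dst_size))
--         batch_begin += dst_size
--     return dst_ranks_and_sizes
-- ===== SOURCE B (Python) =====
-- def get_dst_ranks(
--     batch_size: int, src_world_size: int, dst_world_size: int, src_rank: int
-- ) -> list[tuple[int, int]]:
--     """Compute destination ranks and transfer sizes for one source rank."""
--     assert batch_size % src_world_size == 0, (
--         f"batch_size ({batch_size}) must be divisible by src_world_size ({src_world_size})."
--     )
--     assert batch_size % dst_world_size == 0, (
--         f"batch_size ({batch_size}) must be divisible by dst_world_size ({dst_world_size})."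
--     )
--     assert 0 <= src_rank < src_world_size, (
--         f"src_rank ({src_rank}) must be in [0, {src_world_size})."
--     )
--
--     batch_size_per_src_rank = batch_size // src_world_size
--     batch_size_per_dst_rank = batch_size // dst_world_size
--
--     batch_begin = src_rank * batch_size_per_src_rank
--     batch_end = (src_rank + 1) * batch_size_per_src_rank
--     if batch_begin >= batch_end:
--         return []
--     first_dst = batch_begin // batch_size_per_dst_rank
--     last_dst = (batch_end - 1) // batch_size_per_dst_rank
--     return [
--         (
--             dst_rank,
--             min(batch_end, (dst_rank + 1) * batch_size_per_dst_rank)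
--             - max(batch_begin, dst_rank * batch_size_per_dst_rank),
--         )
--         for dst_rank in range(first_dst, last_dst + 1)
--     ]
-- ===== Notes on version B (the rewrite author's own statement) =====
-- stated objective: alternative
-- what changed: The cursor-advancing while loop with running remainders is replaced by computing the first and last destination rank analytically with floor division and emitting, per rank in that range, the size of the intersection of its interval with the source slice.
import Mathlib
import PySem

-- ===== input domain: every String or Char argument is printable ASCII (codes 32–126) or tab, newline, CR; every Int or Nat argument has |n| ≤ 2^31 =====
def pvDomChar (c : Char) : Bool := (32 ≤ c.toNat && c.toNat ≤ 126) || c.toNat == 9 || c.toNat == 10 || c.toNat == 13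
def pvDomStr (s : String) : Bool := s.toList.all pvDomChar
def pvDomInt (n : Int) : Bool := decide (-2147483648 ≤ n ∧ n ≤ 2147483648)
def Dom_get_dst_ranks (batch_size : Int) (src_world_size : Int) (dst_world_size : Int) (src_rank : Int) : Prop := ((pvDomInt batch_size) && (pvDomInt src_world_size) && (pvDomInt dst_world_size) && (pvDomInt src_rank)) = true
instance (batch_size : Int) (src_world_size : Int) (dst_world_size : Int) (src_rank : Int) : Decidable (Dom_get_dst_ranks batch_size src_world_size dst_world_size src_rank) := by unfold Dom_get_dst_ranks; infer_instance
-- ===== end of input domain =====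

-- B replaces A's cursor-advancing while loop by an analytic computation of the destination-rank
-- range plus per-rank interval intersection; same output, same asymptotic cost (objective: alternative).

-- ===== PORT A =====
-- A's while loop as fuel recursion; fuel (batch_end - batch_begin).toNat suffices on Pre_
-- (each iteration advances the cursor by dst_size ≥ 1 there).
def pvALoop (bpdst be : Int) : Nat → Int → List (Int × Int)
  | 0, _ => []
  | fuel+1, bb =>
    if bb < be then
      let dst_rank := PySem.Int.floordiv bb bpdst
      let dst_batch_begin := dst_rank * bpdst
      let dst_remaining := bpdst - (bb - dst_batch_begin)
      let src_remaining := be - bb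
      let dst_size := min dst_remaining src_remaining
      (dst_rank, dst_size) :: pvALoop bpdst be fuel (bb + dst_size)
    else []

def get_dst_ranks (batch_size : Int) (src_world_size : Int) (dst_world_size : Int) (src_rank : Int) : List (Int × Int) :=
  let batch_size_per_src_rank := PySem.Int.floordiv batch_size src_world_size
  let batch_size_per_dst_rank := PySem.Int.floordiv batch_size dst_world_size
  let batch_begin := src_rank * batch_size_per_src_rank
  let batch_end := (src_rank + 1) * batch_size_per_src_rank
  pvALoop batch_size_per_dst_rank batch_end (batch_end - batch_begin).toNat batch_begin

-- ===== PORT B =====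
def get_dst_ranks_alt (batch_size : Int) (src_world_size : Int) (dst_world_size : Int) (src_rank : Int) : List (Int × Int) :=
  let batch_size_per_src_rank := PySem.Int.floordiv batch_size src_world_size
  let batch_size_per_dst_rank := PySem.Int.floordiv batch_size dst_world_size
  let batch_begin := src_rank * batch_size_per_src_rank
  let batch_end := (src_rank + 1) * batch_size_per_src_rank
  if batch_begin ≥ batch_end then []
  else
    let first_dst := PySem.Int.floordiv batch_begin batch_size_per_dst_rank
    let last_dst := PySem.Int.floordiv (batch_end - 1) batch_size_per_dst_rank
    (PySem.List.pyRange first_dst (last_dst + 1) 1).map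
      (fun dst_rank =>
        (dst_rank,
         min batch_end ((dst_rank + 1) * batch_size_per_dst_rank)
           - max batch_begin (dst_rank * batch_size_per_dst_rank)))

-- ===== PRECONDITION & SPEC =====
-- Pre_ excludes exactly the inputs where A does not return: failed asserts (non-divisibility,
-- src_rank out of range, world size 0 raising ZeroDivisionError) and dst_world_size < 0 with
-- batch_size > 0, where A's cursor moves backwards and the while loop never terminates.
def Pre_get_dst_ranks (batch_size : Int) (src_world_size : Int) (dst_world_size : Int) (src_rank : Int) : Prop :=
  batch_size % src_world_size = 0 ∧ batch_size % dst_world_size = 0 ∧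
  0 ≤ src_rank ∧ src_rank < src_world_size ∧ dst_world_size ≠ 0 ∧
  (0 < dst_world_size ∨ batch_size ≤ 0)
instance (batch_size : Int) (src_world_size : Int) (dst_world_size : Int) (src_rank : Int) : Decidable (Pre_get_dst_ranks batch_size src_world_size dst_world_size src_rank) := by unfold Pre_get_dst_ranks; infer_instance

def pvWitness_get_dst_ranks : Int × Int × Int × Int := (12, 3, 4, 1)

def Spec_get_dst_ranks (batch_size : Int) (src_world_size : Int) (dst_world_size : Int) (src_rank : Int) (out : List (Int × Int)) : Prop := out = get_dst_ranks_alt batch_size src_world_size dst_world_size src_rank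
instance (batch_size : Int) (src_world_size : Int) (dst_world_size : Int) (src_rank : Int) (out : List (Int × Int)) : Decidable (Spec_get_dst_ranks batch_size src_world_size dst_world_size src_rank out) := by unfold Spec_get_dst_ranks; infer_instance

-- ===== CLAIM (what is proved, stated in full; the proofs are below) =====
def Claim_equal_get_dst_ranks : Prop := ∀ (batch_size : Int) (src_world_size : Int) (dst_world_size : Int) (src_rank : Int), Dom_get_dst_ranks batch_size src_world_size dst_world_size src_rank → Pre_get_dst_ranks batch_size src_world_size dst_world_size src_rank → Spec_get_dst_ranks batch_size src_world_size dst_world_size src_rank (get_dst_ranks batch_size src_world_size dst_world_size src_rank)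

-- ===== LEMMAS AND PROOFS =====

theorem pv_ediv_eq (P q x : Int) (hP : 0 < P) (h1 : q * P ≤ x) (h2 : x < (q + 1) * P) :
    x / P = q := by
  have hl : q ≤ x / P := (Int.le_ediv_iff_mul_le hP).mpr h1
  have hr : x / P < q + 1 := (Int.ediv_lt_iff_lt_mul hP).mpr h2
  omega

theorem pvALoop_nil (P be : Int) (fuel : Nat) (bb : Int) (h : ¬ bb < be) :
    pvALoop P be fuel bb = [] := by
  cases fuel <;> simp [pvALoop, h]

-- the core invariant: A's cursor loop emits exactly B's analytic list for the interval [bb, be)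
theorem pvLoop_eq (P : Int) (hP : 0 < P) :
    ∀ (fuel : Nat) (bb be : Int), bb < be → (be - bb).toNat ≤ fuel →
      pvALoop P be fuel bb =
        (PySem.List.pyRange (PySem.Int.floordiv bb P) (PySem.Int.floordiv (be - 1) P + 1) 1).map
          (fun d => (d, min be ((d + 1) * P) - max bb (d * P))) := by
  intro fuel
  induction fuel with
  | zero => intro bb be h1 h2; omega
  | succ fuel ih =>
    intro bb be h1 h2
    rw [PySem.Int.floordiv_eq_ediv_of_pos hP, PySem.Int.floordiv_eq_ediv_of_pos hP]
    set d0 := bb / P with hd0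
    have hmod : P * (bb / P) + bb % P = bb := Int.ediv_add_emod bb P
    have hmn : 0 ≤ bb % P := Int.emod_nonneg bb (by omega)
    have hml : bb % P < P := Int.emod_lt_of_pos bb hP
    simp only [pvALoop, if_pos h1, PySem.Int.floordiv_eq_ediv_of_pos hP, ← hd0]
    set sz := min (P - (bb - d0 * P)) (be - bb) with hsz
    have hPd : d0 * P = P * (bb / P) := by rw [hd0]; ring
    have hPd1 : (d0 + 1) * P = d0 * P + P := by ring
    have hPd2 : (d0 + 1 + 1) * P = d0 * P + P + P := by ring
    have hd0le : d0 * P ≤ bb := by omega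
    have hszpos : 0 < sz := by omega
    by_cases hfin : bb + sz = be
    · -- last chunk: the interval ends inside d0's block
      have hlast : (be - 1) / P = d0 := by
        apply pv_ediv_eq P d0 (be - 1) hP <;> omega
      rw [hlast, pvALoop_nil P be fuel (bb + sz) (by omega),
          PySem.List.pyRange_one_cons (by omega),
          PySem.List.pyRange_one_eq_nil (by omega)]
      simp only [List.map_cons, List.map_nil, List.cons.injEq, and_true, Prod.mk.injEq, true_and]
      omega

    · -- the chunk fills d0's block; the cursor jumps to the block boundary (d0+1)*P
      have hszv : sz = P - (bb - d0 * P) := by omega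
      have hbb' : bb + sz = (d0 + 1) * P := by omega
      have hlt' : bb + sz < be := by omega
      have hdiv' : (bb + sz) / P = d0 + 1 := by
        apply pv_ediv_eq P (d0 + 1) (bb + sz) hP <;> omega
      have hih := ih (bb + sz) be hlt' (by omega)
      rw [PySem.Int.floordiv_eq_ediv_of_pos hP, PySem.Int.floordiv_eq_ediv_of_pos hP, hdiv'] at hih
      have hlastge : d0 + 1 ≤ (be - 1) / P := (Int.le_ediv_iff_mul_le hP).mpr (by omega)
      -- the tail entries only see blocks at or past the boundary, where both maxima are d * P
      have htail : (PySem.List.pyRange (d0 + 1) ((be - 1) / P + 1) 1).map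
            (fun d => (d, min be ((d + 1) * P) - max (bb + sz) (d * P)))
          = (PySem.List.pyRange (d0 + 1) ((be - 1) / P + 1) 1).map
            (fun d => (d, min be ((d + 1) * P) - max bb (d * P))) := by
        apply List.map_congr_left
        intro d hd
        rw [PySem.List.mem_pyRange_one] at hd
        have hdp : (d0 + 1) * P ≤ d * P := by nlinarith [hd.1]
        have hmax : max (bb + sz) (d * P) = max bb (d * P) := by omega
        rw [hmax]
      have hhead : sz = min be ((d0 + 1) * P) - max bb (d0 * P) := by omega
      rw [PySem.List.pyRange_one_cons (show d0 < (be - 1) / P + 1 by omega),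
          List.map_cons, hih, htail, ← hhead]

theorem pv_dvd_quot_pos {a b : Int} (hb : 0 < b) (ha : 0 < a) (h : a % b = 0) : 0 < a / b := by
  have := Int.ediv_add_emod a b
  have hle : a / b ≤ 0 ∨ 0 < a / b := by omega
  rcases hle with hle | h2
  · exfalso; nlinarith [Int.ediv_add_emod a b]
  · exact h2

-- ===== VERDICT (by name: the statement is the Claim_ definition above) =====
theorem get_dst_ranks_spec : Claim_equal_get_dst_ranks := by
  intro bs sws dws sr _ hpre
  obtain ⟨hs, hd, hr0, hrw, hdne, hpos⟩ := hpre
  unfold Spec_get_dst_ranks get_dst_ranks get_dst_ranks_alt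
  have hsws : 0 < sws := by omega
  simp only [PySem.Int.floordiv_eq_ediv_of_pos hsws]
  set bpsrc := bs / sws with hbpsrc
  have hsrc_eq : bpsrc * sws = bs := by
    rw [hbpsrc, mul_comm]
    have := Int.ediv_add_emod bs sws; omega
  by_cases hbs : 0 < bs
  · -- positive batch: per-rank sizes are positive, invoke the loop lemma
    have hdws : 0 < dws := by omega
    have hbp : 0 < bpsrc := pv_dvd_quot_pos hsws hbs hs
    have hbpd : 0 < bs / dws := pv_dvd_quot_pos hdws hbs hd
    have hbb : sr * bpsrc < (sr + 1) * bpsrc := by nlinarith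
    rw [if_neg (by omega)]
    have := pvLoop_eq (bs / dws) hbpd ((sr + 1) * bpsrc - sr * bpsrc).toNat
      (sr * bpsrc) ((sr + 1) * bpsrc) hbb (le_refl _)
    rw [PySem.Int.floordiv_eq_ediv_of_pos hdws] at *
    exact this
  · -- non-positive batch: the source slice is empty, both sides return []
    have hbple : bpsrc ≤ 0 := by nlinarith
    have hbe : ¬ sr * bpsrc < (sr + 1) * bpsrc := by nlinarith
    rw [if_pos (by omega), pvALoop_nil _ _ _ _ hbe]
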